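-- pv_equiv track=rewrite | github.com/nguyenthanhhungDE/Python-for-beginner | 100exepython.py/bai87.py | listklan
-- ===== SOURCE A (Python) =====
-- def listklan(l,k):
--     l_kq = []
--     for i in l:
--         if l.count(i) > k:
--             if i not in l_kq:
--                 l_kq.append(i)
--     l_kq.sort()
--     return l_kq
-- ===== SOURCE B (Python) =====
-- def listklan(l, k):
--     counts = {}
--     for x in l:
--         counts[x] = counts.get(x, 0) + 1
--     return sorted(x for x, c in counts.items() if c > k)
-- ===== Notes on version B (the rewrite author's own statement) =====
-- stated objective: faster
-- what changed: B builds a count dictionary in one pass and sorts only the qualifying distinct keys, replacing A's per-element l.count inner scan and linear membership test.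
import Mathlib
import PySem

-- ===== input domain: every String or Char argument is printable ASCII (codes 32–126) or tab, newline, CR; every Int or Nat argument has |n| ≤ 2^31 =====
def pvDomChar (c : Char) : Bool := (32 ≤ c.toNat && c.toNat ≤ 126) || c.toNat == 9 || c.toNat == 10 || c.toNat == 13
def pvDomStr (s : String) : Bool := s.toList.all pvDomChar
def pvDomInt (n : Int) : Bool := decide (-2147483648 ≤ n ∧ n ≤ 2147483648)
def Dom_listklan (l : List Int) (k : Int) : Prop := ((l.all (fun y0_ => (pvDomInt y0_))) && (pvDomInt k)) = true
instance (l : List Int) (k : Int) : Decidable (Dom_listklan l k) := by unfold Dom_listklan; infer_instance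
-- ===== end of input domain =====

-- B replaces A's per-element l.count scan with a count dictionary built in one pass, then sorts the qualifying distinct keys (faster).
-- ===== PORT A =====
def listklan (l : List Int) (k : Int) : List Int :=
  let l_kq := l.foldl (fun l_kq i =>
    if (l.count i : Int) > k then
      if i ∉ l_kq then l_kq ++ [i] else l_kq
    else l_kq) []
  PySem.List.sorted l_kq (fun x => x) false

-- ===== PORT B =====
def listklan_alt (l : List Int) (k : Int) : List Int :=
  let counts := l.foldl (fun d x => d.insert x (d.getD x 0 + 1)) PySem.Dict.empty
  PySem.List.sorted ((counts.items.filter (fun p => p.2 > k)).map Prod.fst) (fun x => x) false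

-- ===== PRECONDITION & SPEC =====
def Spec_listklan (l : List Int) (k : Int) (out : List Int) : Prop := out = listklan_alt l k
instance (l : List Int) (k : Int) (out : List Int) : Decidable (Spec_listklan l k out) := by unfold Spec_listklan; infer_instance

-- ===== CLAIM (what is proved, stated in full; the proofs are below) =====
def Claim_equal_listklan : Prop := ∀ (l : List Int) (k : Int), Dom_listklan l k → Spec_listklan l k (listklan l k)

-- ===== LEMMAS AND PROOFS =====

-- A's "if i not in l_kq: l_kq.append(i)" is exactly Python-set insertion.
lemma add_step (acc : List Int) (i : Int) :
    (if i ∉ acc then acc ++ [i] else acc) = PySem.Set.add acc i := by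
  by_cases h : i ∈ acc <;> simp [PySem.Set.add, PySem.Set.contains, h]

lemma filter_add (p : Int → Bool) (s : List Int) (x : Int) :
    (PySem.Set.add s x).filter p =
      if p x then PySem.Set.add (s.filter p) x else s.filter p := by
  by_cases h : x ∈ s <;> by_cases hp : p x <;>
    simp [PySem.Set.add, PySem.Set.contains, h, hp, List.filter_append, List.mem_filter]

-- First-occurrence deduplication commutes with filtering by a property of the element.
lemma ofList_filter (p : Int → Bool) (l : List Int) : ∀ s : List Int,
    List.foldl PySem.Set.add (s.filter p) (l.filter p) =
      (List.foldl PySem.Set.add s l).filter p := by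
  induction l with
  | nil => intro s; rfl
  | cons x xs ih =>
    intro s
    by_cases hp : p x
    · simp only [List.filter_cons, hp, if_pos, List.foldl_cons, ← ih]
      rw [filter_add, if_pos hp]
    · simp only [List.filter_cons, hp, List.foldl_cons, ← ih]
      rw [filter_add, if_neg hp]; simp

lemma listklan_eq_alt (l : List Int) (k : Int) : listklan l k = listklan_alt l k := by
  unfold listklan listklan_alt
  simp only [PySem.Dict.foldl_insert_getD_add_one_eq_counter, PySem.Dict.items_counter]
  have hstep : (fun (l_kq : List Int) (i : Int) =>
      if (l.count i : Int) > k then (if i ∉ l_kq then l_kq ++ [i] else l_kq) else l_kq)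
      = (fun l_kq i => if (l.count i : Int) > k then PySem.Set.add l_kq i else l_kq) := by
    funext acc i; rw [add_step]
  rw [hstep, PySem.List.foldl_ite_eq_foldl_filter (p := fun i => (l.count i : Int) > k)]
  have hA := ofList_filter (fun i => decide ((l.count i : Int) > k)) l []
  simp only [List.filter_nil] at hA
  rw [hA, ← PySem.Set.ofList_eq_foldl]
  congr 1
  rw [List.filter_map, List.map_map]
  simp [Function.comp_def]

-- ===== VERDICT (by name: the statement is the Claim_ definition above) =====
theorem listklan_spec : Claim_equal_listklan := by
  intro l k _
  unfold Spec_listklan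
  exact listklan_eq_alt l k
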